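-- pv_equiv track=rewrite | github.com/gominzip/Algorithm | 프로그래머스/2/42888. 오픈채팅방/오픈채팅방.py | solution
-- ===== SOURCE A (Python) =====
-- def solution(record):
--     answer = []
--     user_dic = {}
--     for data in record :
--         line = data.split()
--         if(line[0]=='Change' or line[0]=='Enter') :
--             user_dic[line[1]] = line[2]
--
--     for data in record :
--         line = data.split()
--         if(line[0]=='Enter'):
--             answer.append(user_dic[line[1]] + '님이 들어왔습니다.')
--         if(line[0]=='Leave'):
--             answer.append(user_dic[line[1]] + '님이 나갔습니다.')
--
--     return answer
-- ===== SOURCE B (Python) =====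
-- def solution(record):
--     user_dic = {}
--     events = []
--     for data in record:
--         line = data.split()
--         cmd = line[0]
--         if cmd == 'Enter':
--             user_dic[line[1]] = line[2]
--             events.append((line[1], '님이 들어왔습니다.'))
--         elif cmd == 'Change':
--             user_dic[line[1]] = line[2]
--         elif cmd == 'Leave':
--             events.append((line[1], '님이 나갔습니다.'))
--     return [user_dic[uid] + suffix for uid, suffix in events]
-- ===== Notes on version B (the rewrite author's own statement) =====
-- stated objective: faster
-- what changed: B makes a single pass over record that both builds the final-nickname dict and collects (uid, suffix) events, then produces the answer by one comprehension over the events list, removing A's second re-scan and re-split of record (constant-factor: each line is split once instead of twice).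
import Mathlib
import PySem

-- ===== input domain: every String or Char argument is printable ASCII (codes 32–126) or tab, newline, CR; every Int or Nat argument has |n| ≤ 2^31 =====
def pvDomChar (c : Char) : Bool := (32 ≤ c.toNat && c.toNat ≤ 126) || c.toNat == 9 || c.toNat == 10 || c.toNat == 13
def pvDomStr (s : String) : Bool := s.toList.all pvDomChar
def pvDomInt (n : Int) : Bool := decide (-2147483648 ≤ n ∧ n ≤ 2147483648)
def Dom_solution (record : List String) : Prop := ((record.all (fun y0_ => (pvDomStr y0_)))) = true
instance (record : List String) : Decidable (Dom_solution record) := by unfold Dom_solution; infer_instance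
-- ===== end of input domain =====

-- B does the same job by a different decomposition: one pass over record builds the
-- final-nickname dict and an event list, then one map over the events (no second re-split of record).

-- ===== PORT A =====
-- first loop body of A: user_dic[line[1]] = line[2] on Change/Enter
-- (Python indexing line[0..2] raises IndexError and dict lookup raises KeyError where the
--  PySem primitives give none; the '.getD ""' defaults are only reached outside Pre_solution)
def pvStepDictA (d : PySem.Dict String String) (data : String) : PySem.Dict String String :=
  let line := PySem.Str.split₀ data
  if (PySem.List.pyGet? line 0).getD "" = "Change" ∨ (PySem.List.pyGet? line 0).getD "" = "Enter" then
    d.insert ((PySem.List.pyGet? line 1).getD "") ((PySem.List.pyGet? line 2).getD "")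
  else d

-- second loop body of A: two independent ifs, as in the Python
def pvStepAnsA (user_dic : PySem.Dict String String) (answer : List String) (data : String) : List String :=
  let line := PySem.Str.split₀ data
  let answer :=
    if (PySem.List.pyGet? line 0).getD "" = "Enter" then
      answer ++ [(user_dic.getD ((PySem.List.pyGet? line 1).getD "") "") ++ "님이 들어왔습니다."]
    else answer
  if (PySem.List.pyGet? line 0).getD "" = "Leave" then
    answer ++ [(user_dic.getD ((PySem.List.pyGet? line 1).getD "") "") ++ "님이 나갔습니다."]
  else answer

def solution (record : List String) : List String :=
  let user_dic := record.foldl pvStepDictA PySem.Dict.empty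
  record.foldl (pvStepAnsA user_dic) []

-- ===== PORT B =====
-- single-pass step of B: update the dict and append (uid, suffix) events
def pvStepB (st : PySem.Dict String String × List (String × String)) (data : String) :
    PySem.Dict String String × List (String × String) :=
  let line := PySem.Str.split₀ data
  let cmd := (PySem.List.pyGet? line 0).getD ""
  let uid := (PySem.List.pyGet? line 1).getD ""
  if cmd = "Enter" then
    (st.1.insert uid ((PySem.List.pyGet? line 2).getD ""), st.2 ++ [(uid, "님이 들어왔습니다.")])
  else if cmd = "Change" then
    (st.1.insert uid ((PySem.List.pyGet? line 2).getD ""), st.2)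
  else if cmd = "Leave" then
    (st.1, st.2 ++ [(uid, "님이 나갔습니다.")])
  else st

def solution_alt (record : List String) : List String :=
  let st := record.foldl pvStepB (PySem.Dict.empty, [])
  st.2.map (fun e => (st.1.getD e.1 "") ++ e.2)

-- ===== PRECONDITION & SPEC =====
-- Pre_ excludes exactly the inputs on which the Python A raises: a record line whose split is
-- empty (IndexError on line[0]), an Enter/Change line with fewer than 3 tokens (IndexError), or a
-- Leave line with fewer than 2 tokens or whose uid never appears in any Enter/Change line (KeyError).
def Pre_solution (record : List String) : Prop :=
  ∀ data ∈ record,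
    PySem.Str.split₀ data ≠ [] ∧
    (((PySem.Str.split₀ data).head? = some "Enter" ∨ (PySem.Str.split₀ data).head? = some "Change") →
      3 ≤ (PySem.Str.split₀ data).length) ∧
    ((PySem.Str.split₀ data).head? = some "Leave" →
      2 ≤ (PySem.Str.split₀ data).length ∧
      ∃ d ∈ record, ((PySem.Str.split₀ d).head? = some "Enter" ∨ (PySem.Str.split₀ d).head? = some "Change") ∧
        (PySem.Str.split₀ d)[1]? = (PySem.Str.split₀ data)[1]?)
instance (record : List String) : Decidable (Pre_solution record) := by unfold Pre_solution; infer_instance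

def pvWitness_solution : List String := ["Enter uid1 muzi", "Leave uid1", "Enter uid1 prodo"]

def Spec_solution (record : List String) (out : List String) : Prop := out = solution_alt record
instance (record : List String) (out : List String) : Decidable (Spec_solution record out) := by unfold Spec_solution; infer_instance

-- ===== CLAIM (what is proved, stated in full; the proofs are below) =====
def Claim_equal_solution : Prop := ∀ (record : List String), Dom_solution record → Pre_solution record → Spec_solution record (solution record)

-- ===== LEMMAS AND PROOFS =====
-- the (uid, suffix) events B collects, as a function of record alone
def pvEvents : List String → List (String × String)
  | [] => []
  | data :: rest =>
    let line := PySem.Str.split₀ data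
    let cmd := (PySem.List.pyGet? line 0).getD ""
    let uid := (PySem.List.pyGet? line 1).getD ""
    (if cmd = "Enter" then [(uid, "님이 들어왔습니다.")]
     else if cmd = "Leave" then [(uid, "님이 나갔습니다.")] else []) ++ pvEvents rest

theorem pvFoldB_eq (record : List String) :
    ∀ (d : PySem.Dict String String) (ev : List (String × String)),
      record.foldl pvStepB (d, ev) = (record.foldl pvStepDictA d, ev ++ pvEvents record) := by
  induction record with
  | nil => intro d ev; simp [pvEvents]
  | cons data rest ih =>
    intro d ev
    simp only [List.foldl_cons, pvStepB, pvStepDictA, pvEvents]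
    split_ifs with h1 h2 h3 h4 <;> simp_all

theorem pvFoldAnsA_eq (D : PySem.Dict String String) (record : List String) :
    ∀ (acc : List String),
      record.foldl (pvStepAnsA D) acc
        = acc ++ (pvEvents record).map (fun e => (D.getD e.1 "") ++ e.2) := by
  induction record with
  | nil => intro acc; simp [pvEvents]
  | cons data rest ih =>
    intro acc
    simp only [List.foldl_cons, pvStepAnsA, pvEvents]
    split_ifs with h1 h2 h3 <;> simp_all

-- ===== VERDICT (by name: the statement is the Claim_ definition above) =====
theorem solution_spec : Claim_equal_solution := by
  intro record _ _
  show solution record = solution_alt record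
  unfold solution solution_alt
  rw [pvFoldB_eq, pvFoldAnsA_eq]
  simp
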